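-- pv_equiv track=rewrite | github.com/EddyBody/tur | tur.py | _status_text
-- ===== SOURCE A (Python) =====
-- def _status_text(vessels: dict) -> tuple[str, str]:
--     """Returnerer (type, tekst) for status-meldingen."""
--     v_live  = sum(1 for v in vessels.values() if v.get("lat") and not v.get("from_cache"))
--     v_cache = sum(1 for v in vessels.values() if v.get("lat") and v.get("from_cache"))
--     parts = []
--     if v_live:  parts.append(f"{v_live} live")
--     if v_cache: parts.append(f"{v_cache} fra cache")
--     if parts:
--         return ("info", f"🚢 Skip: {' · '.join(parts)}")
--     return ("info", "Ingen skipposisjoner lastet ennå.")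
-- ===== SOURCE B (Python) =====
-- def _status_text(vessels: dict) -> tuple[str, str]:
--     """Returnerer (type, tekst) for status-meldingen."""
--     v_live = 0
--     v_cache = 0
--     for v in vessels.values():
--         if v.get("lat"):
--             if v.get("from_cache"):
--                 v_cache += 1
--             else:
--                 v_live += 1
--     if v_live and v_cache:
--         msg = f"🚢 Skip: {v_live} live · {v_cache} fra cache"
--     elif v_live:
--         msg = f"🚢 Skip: {v_live} live"
--     elif v_cache:
--         msg = f"🚢 Skip: {v_cache} fra cache"
--     else:
--         msg = "Ingen skipposisjoner lastet ennå."
--     return ("info", msg)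
-- ===== Notes on version B (the rewrite author's own statement) =====
-- stated objective: simpler
-- what changed: One pass over vessels.values() maintaining both counters (instead of two generator-expression scans), and the message is chosen by a direct four-way conditional instead of building a parts list and joining it.
import Mathlib
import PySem

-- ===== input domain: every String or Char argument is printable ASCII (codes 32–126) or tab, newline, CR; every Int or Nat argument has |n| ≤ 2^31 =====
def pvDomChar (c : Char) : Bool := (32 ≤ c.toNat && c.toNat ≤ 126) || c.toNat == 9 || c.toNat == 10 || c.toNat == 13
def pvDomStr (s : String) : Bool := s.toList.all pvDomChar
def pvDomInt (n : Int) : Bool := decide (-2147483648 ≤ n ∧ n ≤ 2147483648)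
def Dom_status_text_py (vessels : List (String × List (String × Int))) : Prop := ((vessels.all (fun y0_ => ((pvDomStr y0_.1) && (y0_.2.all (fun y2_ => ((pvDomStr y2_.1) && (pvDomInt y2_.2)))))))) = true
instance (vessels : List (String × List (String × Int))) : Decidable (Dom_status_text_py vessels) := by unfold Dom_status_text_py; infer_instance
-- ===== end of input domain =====

-- B replaces A's two generator-expression scans and parts/join message assembly by one
-- counting pass over the values and a direct four-way conditional (objective: simpler).


-- ===== PORT A =====
-- truthiness of v.get(k) for an int-valued dict: missing key and 0 are falsy
def pvTruthy (v : List (String × Int)) (k : String) : Bool :=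
  (PySem.Dict.ofList v).getD k 0 != 0

def status_text_py (vessels : List (String × List (String × Int))) : String × String :=
  let vals := (PySem.Dict.ofList vessels).values
  let v_live : Int :=
    vals.foldl (fun acc v => if pvTruthy v "lat" && !pvTruthy v "from_cache" then acc + 1 else acc) 0
  let v_cache : Int :=
    vals.foldl (fun acc v => if pvTruthy v "lat" && pvTruthy v "from_cache" then acc + 1 else acc) 0
  let parts : List String := []
  let parts := if v_live != 0 then parts ++ [PySem.Int.toStr v_live ++ " live"] else parts
  let parts := if v_cache != 0 then parts ++ [PySem.Int.toStr v_cache ++ " fra cache"] else parts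
  if parts ≠ [] then ("info", "🚢 Skip: " ++ PySem.Str.join " · " parts)
  else ("info", "Ingen skipposisjoner lastet ennå.")

-- ===== PORT B =====
def status_text_py_alt (vessels : List (String × List (String × Int))) : String × String :=
  let counts :=
    ((PySem.Dict.ofList vessels).values).foldl
      (fun (p : Int × Int) v =>
        if pvTruthy v "lat" then
          if pvTruthy v "from_cache" then (p.1, p.2 + 1) else (p.1 + 1, p.2)
        else p)
      (0, 0)
  let v_live := counts.1
  let v_cache := counts.2
  let msg :=
    if v_live != 0 && v_cache != 0 then
      "🚢 Skip: " ++ PySem.Int.toStr v_live ++ " live · " ++ PySem.Int.toStr v_cache ++ " fra cache"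
    else if v_live != 0 then "🚢 Skip: " ++ PySem.Int.toStr v_live ++ " live"
    else if v_cache != 0 then "🚢 Skip: " ++ PySem.Int.toStr v_cache ++ " fra cache"
    else "Ingen skipposisjoner lastet ennå."
  ("info", msg)

-- ===== PRECONDITION & SPEC =====
def Spec_status_text_py (vessels : List (String × List (String × Int))) (out : String × String) : Prop := out = status_text_py_alt vessels
instance (vessels : List (String × List (String × Int))) (out : String × String) : Decidable (Spec_status_text_py vessels out) := by unfold Spec_status_text_py; infer_instance

-- ===== CLAIM (what is proved, stated in full; the proofs are below) =====
def Claim_equal_status_text_py : Prop := ∀ (vessels : List (String × List (String × Int))), Dom_status_text_py vessels → Spec_status_text_py vessels (status_text_py vessels)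

-- ===== LEMMAS AND PROOFS =====

-- B's paired fold computes A's two counts at once
theorem pvPairFold (vals : List (List (String × Int))) (a b : Int) :
    vals.foldl
      (fun (p : Int × Int) v =>
        if pvTruthy v "lat" then
          if pvTruthy v "from_cache" then (p.1, p.2 + 1) else (p.1 + 1, p.2)
        else p)
      (a, b)
    = (vals.foldl (fun acc v => if pvTruthy v "lat" && !pvTruthy v "from_cache" then acc + 1 else acc) a,
       vals.foldl (fun acc v => if pvTruthy v "lat" && pvTruthy v "from_cache" then acc + 1 else acc) b) := by
  induction vals generalizing a b with
  | nil => rfl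
  | cons v vs ih =>
    simp only [List.foldl_cons]
    cases hl : pvTruthy v "lat" <;> cases hc : pvTruthy v "from_cache" <;>
      simp [ih]

-- ===== VERDICT (by name: the statement is the Claim_ definition above) =====
theorem status_text_py_spec : Claim_equal_status_text_py := by
  intro vessels _
  simp only [Spec_status_text_py, status_text_py, status_text_py_alt, pvPairFold]
  generalize List.foldl
      (fun (acc : Int) (v : List (String × Int)) =>
        if pvTruthy v "lat" && !pvTruthy v "from_cache" then acc + 1 else acc)
      0 ((PySem.Dict.ofList vessels).values) = L
  generalize List.foldl
      (fun (acc : Int) (v : List (String × Int)) =>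
        if pvTruthy v "lat" && pvTruthy v "from_cache" then acc + 1 else acc)
      0 ((PySem.Dict.ofList vessels).values) = C
  by_cases hl : L = 0 <;> by_cases hc : C = 0
  · simp [hl, hc]
  · simp [hl, hc]
    apply String.toList_injective
    simp [PySem.Str.join, PySem.Chars.join_singleton]
  · simp [hl, hc]
    apply String.toList_injective
    simp [PySem.Str.join, PySem.Chars.join_singleton]
  · simp [hl, hc]
    apply String.toList_injective
    simp [PySem.Str.join, PySem.Chars.join_cons_cons, PySem.Chars.join_singleton]
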